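-- pv_equiv track=rewrite | github.com/BManussanan/My-python-project | Final_practice/F02.py | mother_name
-- ===== SOURCE A (Python) =====
-- def mother_name(m):
--     vowel = ['a','e','i','o','u']
--     j = 0
--     a = 0
--     while j < len(m):
--         if a == 1:
--             break
--         if m[j] in vowel:
--             a += 1
--         j += 1
--     n2 = m[j:]
--     if not n2:
--         return m
--     else:
--         return n2
-- ===== SOURCE B (Python) =====
-- def mother_name(m):
--     positions = [p for p in (m.find(v) for v in 'aeiou') if p >= 0]
--     if not positions:
--         return m
--     result = m[min(positions) + 1:]
--     return result if result else m
-- ===== Notes on version B (the rewrite author's own statement) =====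
-- stated objective: alternative
-- what changed: Replaces A's index-driven while loop with a hit counter by computing each vowel's str.find position, taking the minimum of the non-negative ones as the first-vowel index, and slicing once after it.
import Mathlib
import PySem

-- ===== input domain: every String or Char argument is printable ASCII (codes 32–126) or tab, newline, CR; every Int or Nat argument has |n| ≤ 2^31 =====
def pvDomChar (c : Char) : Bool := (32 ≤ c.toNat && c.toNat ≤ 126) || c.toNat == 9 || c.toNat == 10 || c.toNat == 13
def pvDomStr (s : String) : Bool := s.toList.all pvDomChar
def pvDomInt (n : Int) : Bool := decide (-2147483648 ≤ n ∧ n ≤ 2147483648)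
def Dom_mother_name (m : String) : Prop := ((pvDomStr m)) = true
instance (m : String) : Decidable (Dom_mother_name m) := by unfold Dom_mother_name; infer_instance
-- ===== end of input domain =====

-- B locates the first vowel as the minimum of per-vowel str.find positions instead of A's
-- char-by-char while loop with a hit counter; objective: alternative decomposition, same cost.
-- ===== PORT A =====
-- A's vowel list
def vowelA : List Char := ['a', 'e', 'i', 'o', 'u']

-- A's while loop over index j with hit counter a (m[j] is in range since j < len m)
def loopA (m : List Char) (j a : Nat) : Nat :=
  if h : j < m.length then
    if a = 1 then j
    else loopA m (j + 1) (if m[j] ∈ vowelA then a + 1 else a)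
  else j
termination_by m.length - j

def mother_name (m : String) : String :=
  let cs := m.toList
  let j := loopA cs 0 0
  let n2 := PySem.List.slice cs (some (j : Int)) none   -- m[j:]
  if n2 = [] then m else String.ofList n2

-- ===== PORT B =====
def mother_name_alt (m : String) : String :=
  let positions := (['a', 'e', 'i', 'o', 'u'].map
      (fun v => PySem.Chars.find m.toList [v])).filter (fun p => decide (0 ≤ p))
  match PySem.List.min? positions (fun x => x) with
  | none => m
  | some i =>
      let result := PySem.List.slice m.toList (some (i + 1)) none   -- m[min(positions)+1:]
      if result = [] then m else String.ofList result

-- ===== PRECONDITION & SPEC =====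
def Spec_mother_name (m : String) (out : String) : Prop := out = mother_name_alt m
instance (m : String) (out : String) : Decidable (Spec_mother_name m out) := by unfold Spec_mother_name; infer_instance

-- ===== CLAIM (what is proved, stated in full; the proofs are below) =====
def Claim_equal_mother_name : Prop := ∀ (m : String), Dom_mother_name m → Spec_mother_name m (mother_name m)

-- ===== LEMMAS AND PROOFS =====

-- A's loop with a = 1 exits immediately
theorem loopA_one (m : List Char) (j : Nat) : loopA m j 1 = j := by
  unfold loopA; split <;> simp

-- A's loop from j with no hit yet, characterised by findIdx? on the suffix
theorem loopA_zero (m : List Char) (j : Nat) (hj : j ≤ m.length) :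
    loopA m j 0 = match (m.drop j).findIdx? (fun c => c ∈ vowelA) with
      | some t => j + t + 1
      | none => m.length := by
  by_cases h : j < m.length
  · rw [loopA]
    have hdrop : m.drop j = m[j] :: m.drop (j + 1) := List.drop_eq_getElem_cons h
    rw [hdrop, List.findIdx?_cons]
    by_cases hv : m[j] ∈ vowelA
    · simp [h, hv, loopA_one]
    · have ih := loopA_zero m (j + 1) (by omega)
      simp only [h, dif_pos, if_neg (by decide : ¬ (0 : Nat) = 1), hv, ih,
        if_false, decide_false]
      cases hfi : (m.drop (j + 1)).findIdx? (fun c => decide (c ∈ vowelA)) <;>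
        simp <;> omega
  · rw [loopA]
    have hd : m.drop j = [] := List.drop_eq_nil_of_le (by omega)
    simp [h, hd]; omega
termination_by m.length - j
decreasing_by omega

-- a one-character prefix is the first element
theorem singleton_prefix_iff (l : List Char) (a : Char) : [a] <+: l ↔ l[0]? = some a := by
  constructor
  · rintro ⟨t, rfl⟩; simp
  · intro h; cases l with
    | nil => simp at h
    | cons x xs => simp at h; subst h; exact ⟨xs, rfl⟩

-- [v] is a prefix of cs.drop i exactly when cs[i] is v
theorem prefix_drop_single (cs : List Char) (v : Char) (i : Nat) :
    [v] <+: cs.drop i ↔ cs[i]? = some v := by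
  rw [singleton_prefix_iff, ← List.head?_eq_getElem?, List.head?_drop]

-- str.find of a single character at its first occurrence
theorem find_single (cs : List Char) (v : Char) (k : Nat)
    (hk : cs[k]? = some v) (hmin : ∀ j < k, cs[j]? ≠ some v) :
    PySem.Chars.find cs [v] = (k : Int) := by
  have h0 : 0 ≤ PySem.Chars.find cs [v] := by
    rw [PySem.Chars.find_nonneg_iff, ← PySem.Chars.isIn_iff_infix,
      ← PySem.Chars.exists_prefix_drop_iff_isIn]
    exact ⟨k, (prefix_drop_single cs v k).mpr hk⟩
  obtain ⟨hpre, hfirst⟩ := PySem.Chars.find_spec h0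
  set t := (PySem.Chars.find cs [v]).toNat with ht
  have htv : cs[t]? = some v := (prefix_drop_single cs v t).mp hpre
  have : t = k := by
    rcases Nat.lt_trichotomy t k with h | h | h
    · exact absurd htv (hmin t h)
    · exact h
    · exact absurd ((prefix_drop_single cs v k).mpr hk) (hfirst k h)
  omega
-- no occurrence of v means find is negative
theorem find_none (cs : List Char) (v : Char) (h : ∀ (j : Nat), cs[j]? ≠ some v) :
    ¬ 0 ≤ PySem.Chars.find cs [v] := by
  rw [PySem.Chars.find_nonneg_iff, ← PySem.Chars.isIn_iff_infix,
    ← PySem.Chars.exists_prefix_drop_iff_isIn]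
  rintro ⟨j, hj⟩
  exact h j ((prefix_drop_single cs v j).mp hj)

-- a nonnegative find of v is at least any index below which v does not occur
theorem find_ge (cs : List Char) (v : Char) (k : Nat)
    (hmin : ∀ (j : Nat), j < k → cs[j]? ≠ some v) (h0 : 0 ≤ PySem.Chars.find cs [v]) :
    (k : Int) ≤ PySem.Chars.find cs [v] := by
  obtain ⟨hpre, _⟩ := PySem.Chars.find_spec h0
  have htv := (prefix_drop_single cs v _).mp hpre
  by_contra hlt
  exact hmin (PySem.Chars.find cs [v]).toNat (by omega) htv

-- ===== VERDICT (by name: the statement is the Claim_ definition above) =====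
theorem mother_name_spec : Claim_equal_mother_name := by
  intro m _
  unfold Spec_mother_name
  simp only [mother_name, mother_name_alt]
  set cs := m.toList with hcs
  have hloop := loopA_zero cs 0 (by omega)
  simp only [List.drop_zero] at hloop
  cases hfi : cs.findIdx? (fun c => decide (c ∈ vowelA)) with
  | none =>
    -- no vowel anywhere: A's loop runs to the end, B's position list is empty
    rw [hfi] at hloop
    simp only [] at hloop
    have hnov : ∀ x ∈ cs, x ∉ vowelA := by
      intro x hx
      have := List.findIdx?_eq_none_iff.mp hfi x hx
      simpa using this
    have hpos : ((['a','e','i','o','u'].map (fun v => PySem.Chars.find cs [v])).filter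
        (fun p => decide (0 ≤ p))) = [] := by
      rw [List.filter_eq_nil_iff]
      intro p hp
      obtain ⟨v, hv, rfl⟩ := List.mem_map.mp hp
      have : ∀ (j : Nat), cs[j]? ≠ some v := by
        intro j hj
        have hjlt : j < cs.length := by
          by_contra hge
          rw [List.getElem?_eq_none (by omega)] at hj
          exact Option.some_ne_none v hj.symm
        have hxv : cs[j] = v := by simpa [List.getElem?_eq_getElem hjlt] using hj
        exact hnov cs[j] (List.getElem_mem hjlt) (by rw [hxv]; exact hv)
      simpa using find_none cs v this
    rw [hloop, hpos]
    have hmn : PySem.List.min? ([] : List Int) (fun x => x) = none :=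
      (PySem.List.min?_eq_none_iff _ _).mpr rfl
    simp [hmn, PySem.List.slice_from_natCast]
  | some k =>
    -- first vowel at index k: A's loop stops at k+1, B's minimum position is k
    rw [hfi] at hloop
    have hloop' : loopA cs 0 0 = k + 1 := by rw [hloop]; show 0 + k + 1 = k + 1; omega
    obtain ⟨hk, hkv, hbefore⟩ := List.findIdx?_eq_some_iff_getElem.mp hfi
    have hkv' : cs[k] ∈ vowelA := by simpa using hkv
    have hnob : ∀ (j : Nat), j < k → ∀ v ∈ vowelA, cs[j]? ≠ some v := by
      intro j hj v hv hjv
      have hjlt : j < cs.length := by omega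
      have : cs[j] = v := by simpa [List.getElem?_eq_getElem hjlt] using hjv
      have hb : ¬ (cs[j] ∈ vowelA) := by simpa using hbefore j hj
      exact hb (this ▸ hv)
    have hfk : PySem.Chars.find cs [cs[k]] = (k : Int) :=
      find_single cs cs[k] k (List.getElem?_eq_getElem hk)
        (fun j hj => hnob j hj cs[k] hkv')
    set positions := ((['a','e','i','o','u'].map (fun v => PySem.Chars.find cs [v])).filter
        (fun p => decide (0 ≤ p))) with hposdef
    have hkmem : (k : Int) ∈ positions := by
      rw [hposdef, List.mem_filter]
      exact ⟨List.mem_map.mpr ⟨cs[k], show cs[k] ∈ ['a','e','i','o','u'] from hkv', hfk⟩, by simp⟩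
    have hge : ∀ p ∈ positions, (k : Int) ≤ p := by
      intro p hp
      rw [hposdef, List.mem_filter] at hp
      obtain ⟨hpm, hp0⟩ := hp
      obtain ⟨v, hv, rfl⟩ := List.mem_map.mp hpm
      exact find_ge cs v k (fun j hj => hnob j hj v (show v ∈ vowelA from hv))
        (by simpa using hp0)
    obtain ⟨i, hi⟩ : ∃ i, PySem.List.min? positions (fun x => x) = some i := by
      cases hmn : PySem.List.min? positions (fun x => x) with
      | none =>
        rw [PySem.List.min?_eq_none_iff] at hmn
        rw [hmn] at hkmem; exact absurd hkmem (List.not_mem_nil)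
      | some i => exact ⟨i, rfl⟩
    have hik : i = (k : Int) := by
      have h1 := PySem.List.min?_isMin hi (k : Int) hkmem
      have h2 := hge i (PySem.List.min?_mem hi)
      omega
    have hc : ((k : Int) + 1) = ((k + 1 : Nat) : Int) := by push_cast; ring
    rw [hloop', hi, hik]
    simp only [hc, PySem.List.slice_from_natCast]
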